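-- pv_equiv track=rewrite | github.com/vipin752/datascience-machineLearning | AEGIS/NLP/Assignment/Assignment_3.py | get_unigram_features
-- ===== SOURCE A (Python) =====
-- vocab=[]
--
-- def get_unigram_features(data,vocab):
--     fet_vec_all = []
--     for tup in data:
--         single_feat_vec = []
--         sent = tup[0].lower() #lowercasing the dataset
--         for v in vocab:
--             if ''.join(sent).__contains__(v):
--                 single_feat_vec.append(1)
--             else:
--                 single_feat_vec.append(0)
--         fet_vec_all.append(single_feat_vec)
--     return fet_vec_all
-- ===== SOURCE B (Python) =====
-- def _all_substrings(sent):
--     n = len(sent)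
--     subs = set()
--     for i in range(n + 1):
--         for j in range(i, n + 1):
--             subs.add(sent[i:j])
--     return subs
--
-- def get_unigram_features(data, vocab):
--     fet_vec_all = []
--     for tup in data:
--         sent = tup[0].lower()
--         subs = _all_substrings(sent)
--         fet_vec_all.append([1 if v in subs else 0 for v in vocab])
--     return fet_vec_all
-- ===== Notes on version B (the rewrite author's own statement) =====
-- stated objective: faster
-- what changed: Per sentence B builds a hash set of all its substrings once and answers each vocab query with an O(1) set lookup, instead of A's linear substring scan of the sentence for every vocab entry.
import Mathlib
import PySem

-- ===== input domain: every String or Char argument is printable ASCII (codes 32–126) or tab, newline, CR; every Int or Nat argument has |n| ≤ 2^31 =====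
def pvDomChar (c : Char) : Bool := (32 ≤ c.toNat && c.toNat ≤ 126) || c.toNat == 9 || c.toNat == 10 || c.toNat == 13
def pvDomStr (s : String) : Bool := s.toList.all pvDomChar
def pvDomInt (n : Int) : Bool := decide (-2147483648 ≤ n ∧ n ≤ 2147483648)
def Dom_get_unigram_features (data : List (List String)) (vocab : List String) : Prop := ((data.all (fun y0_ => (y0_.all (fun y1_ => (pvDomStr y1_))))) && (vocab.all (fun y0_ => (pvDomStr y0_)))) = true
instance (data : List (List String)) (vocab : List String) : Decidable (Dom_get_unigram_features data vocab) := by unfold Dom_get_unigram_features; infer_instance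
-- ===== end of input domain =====

-- B builds, per sentence, a set of all its substrings once and answers each vocab
-- query by a set lookup, instead of A's per-word substring scan of the sentence.

-- ===== PORT A =====
def get_unigram_features (data : List (List String)) (vocab : List String) : List (List Int) :=
  data.foldl (fun fet_vec_all tup =>
    match PySem.List.pyGet? tup 0 with
    | none => fet_vec_all   -- tup[0] raises IndexError; excluded by Pre_
    | some t0 =>
      let sent := PySem.Str.lower t0
      -- ''.join(sent) with sent a str joins its characters (exact)
      let joined := PySem.Str.join "" (sent.toList.map (fun c => String.ofList [c]))
      let single_feat_vec := vocab.foldl (fun acc v =>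
        if PySem.Str.isIn v joined then acc ++ [(1 : Int)] else acc ++ [(0 : Int)]) []
      fet_vec_all ++ [single_feat_vec]) []

-- ===== PORT B =====
def pvAllSubs (sent : String) : PySem.Set String :=
  (PySem.List.pyRange 0 (PySem.Str.len sent + 1) 1).foldl (fun acc i =>
    (PySem.List.pyRange i (PySem.Str.len sent + 1) 1).foldl (fun acc2 j =>
      PySem.Set.add acc2 (PySem.Str.slice sent (some i) (some j))) acc) PySem.Set.empty

def get_unigram_features_alt (data : List (List String)) (vocab : List String) : List (List Int) :=
  data.foldl (fun fet_vec_all tup =>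
    match PySem.List.pyGet? tup 0 with
    | none => fet_vec_all   -- tup[0] raises IndexError; excluded by Pre_
    | some t0 =>
      let sent := PySem.Str.lower t0
      let subs := pvAllSubs sent
      fet_vec_all ++ [vocab.map (fun v => if PySem.Set.contains subs v then (1 : Int) else 0)]) []

-- ===== PRECONDITION & SPEC =====
-- A evaluates tup[0] for every tup in data: an empty inner list raises IndexError.
def Pre_get_unigram_features (data : List (List String)) (vocab : List String) : Prop :=
  ∀ tup ∈ data, tup ≠ []
instance (data : List (List String)) (vocab : List String) : Decidable (Pre_get_unigram_features data vocab) := by unfold Pre_get_unigram_features; infer_instance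

def pvWitness_get_unigram_features : List (List String) × List String :=
  ([["Hello World"], ["abc", "extra"]], ["ell", "o w", "z", ""])

def Spec_get_unigram_features (data : List (List String)) (vocab : List String) (out : List (List Int)) : Prop := out = get_unigram_features_alt data vocab
instance (data : List (List String)) (vocab : List String) (out : List (List Int)) : Decidable (Spec_get_unigram_features data vocab out) := by unfold Spec_get_unigram_features; infer_instance

-- ===== CLAIM (what is proved, stated in full; the proofs are below) =====
def Claim_equal_get_unigram_features : Prop := ∀ (data : List (List String)) (vocab : List String), Dom_get_unigram_features data vocab → Pre_get_unigram_features data vocab → Spec_get_unigram_features data vocab (get_unigram_features data vocab)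

-- ===== LEMMAS AND PROOFS =====

-- membership in a nested add-fold over two ranges
theorem pv_mem_double_fold {α : Type} [BEq α] [LawfulBEq α] (l : List Int) (f : Int → List Int)
    (g : Int → Int → α) (init : PySem.Set α) (y : α) :
    y ∈ l.foldl (fun acc i => (f i).foldl (fun a2 j => PySem.Set.add a2 (g i j)) acc) init ↔
      y ∈ init ∨ ∃ i ∈ l, ∃ j ∈ f i, y = g i j := by
  induction l generalizing init with
  | nil => simp
  | cons a t ih =>
      simp only [List.foldl_cons, ih, PySem.Set.mem_foldl_add, List.mem_cons]
      constructor
      · rintro (⟨h | ⟨j, hj, rfl⟩⟩ | ⟨i, hi, j, hj, rfl⟩)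
        · exact Or.inl h
        · exact Or.inr ⟨a, Or.inl rfl, j, hj, rfl⟩
        · exact Or.inr ⟨i, Or.inr hi, j, hj, rfl⟩
      · rintro (h | ⟨i, (rfl | hi), j, hj, rfl⟩)
        · exact Or.inl (Or.inl h)
        · exact Or.inl (Or.inr ⟨j, hj, rfl⟩)
        · exact Or.inr ⟨i, hi, j, hj, rfl⟩

-- the substring set built by B contains exactly the substrings A's 'in' finds
theorem pv_mem_allSubs (sent v : String) :
    v ∈ pvAllSubs sent ↔ PySem.Str.isIn v sent = true := by
  unfold pvAllSubs
  rw [pv_mem_double_fold]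
  simp only [PySem.Set.empty, List.not_mem_nil, false_or, PySem.List.mem_pyRange_one,
    PySem.Str.len_eq]
  constructor
  · rintro ⟨i, ⟨hi0, _⟩, j, ⟨hij, _⟩, rfl⟩
    rw [PySem.Str.isIn_eq, PySem.Chars.isIn_iff_infix, PySem.Str.toList_slice,
      PySem.Chars.slice_eq_listSlice, PySem.List.slice_toNat _ hi0 (le_trans hi0 hij)]
    exact List.infix_iff_prefix_suffix.mpr
      ⟨sent.toList.drop i.toNat, List.take_prefix _ _, List.drop_suffix _ _⟩
  · intro h
    rw [PySem.Str.isIn_eq, PySem.Chars.isIn_iff_infix] at h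
    obtain ⟨t, u, ht⟩ := h
    have hlen : t.length + v.toList.length + u.length = sent.toList.length := by
      rw [← ht]; simp only [List.length_append]
    refine ⟨(t.length : Int), ⟨Int.natCast_nonneg _, by omega⟩,
      (t.length : Int) + (v.toList.length : Int),
      ⟨le_add_of_nonneg_right (Int.natCast_nonneg _), by omega⟩, ?_⟩
    rw [← String.toList_inj, PySem.Str.toList_slice, PySem.Chars.slice_eq_listSlice,
      PySem.List.slice_natCast_add, ← ht, List.append_assoc]
    simp

-- A's per-sentence row equals B's per-sentence row
theorem pv_row_eq (vocab : List String) (sent : String) :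
    vocab.foldl (fun acc v =>
      if PySem.Str.isIn v (PySem.Str.join "" (sent.toList.map (fun c => String.ofList [c]))) then acc ++ [(1 : Int)] else acc ++ [(0 : Int)]) [] =
    vocab.map (fun v => if PySem.Set.contains (pvAllSubs sent) v then (1 : Int) else 0) := by
  have hstep : ∀ (acc : List Int), ∀ v ∈ vocab,
      (if PySem.Str.isIn v (PySem.Str.join "" (sent.toList.map (fun c => String.ofList [c]))) then acc ++ [(1 : Int)] else acc ++ [(0 : Int)]) =
      acc ++ [if PySem.Set.contains (pvAllSubs sent) v then (1 : Int) else 0] := by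
    intro acc v _
    have hj : PySem.Str.isIn v (PySem.Str.join "" (sent.toList.map (fun c => String.ofList [c])))
        = PySem.Str.isIn v sent := by
      have h : List.map (String.toList ∘ fun c : Char => String.ofList [c]) sent.toList
          = List.map (fun c : Char => [c]) sent.toList := by simp
      simp only [PySem.Str.isIn_eq, PySem.Str.toList_join, List.map_map, h,
        PySem.Chars.join_nil_singletons, String.toList_empty]
    have hcb : PySem.Set.contains (pvAllSubs sent) v = PySem.Str.isIn v sent := by
      by_cases hm : v ∈ pvAllSubs sent
      · rw [(PySem.Set.contains_iff _ _).mpr hm, (pv_mem_allSubs sent v).mp hm]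
      · have h1 : PySem.Set.contains (pvAllSubs sent) v = false :=
          Bool.eq_false_iff.mpr (fun hc => hm ((PySem.Set.contains_iff _ _).mp hc))
        have h2 : PySem.Str.isIn v sent = false :=
          Bool.eq_false_iff.mpr (fun hi => hm ((pv_mem_allSubs sent v).mpr hi))
        rw [h1, h2]
    rw [hj, hcb]
    split <;> rfl
  rw [PySem.List.foldl_congr_mem _ _ _ _ hstep, PySem.List.foldl_append_singleton_eq_map]
  simp

-- ===== VERDICT (by name: the statement is the Claim_ definition above) =====
theorem get_unigram_features_spec : Claim_equal_get_unigram_features := by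
  intro data vocab _ hpre
  unfold Spec_get_unigram_features get_unigram_features get_unigram_features_alt
  apply PySem.List.foldl_congr_mem
  intro acc tup htup
  obtain ⟨t0, rest, rfl⟩ := List.exists_cons_of_ne_nil (hpre tup htup)
  have hg : PySem.List.pyGet? (t0 :: rest) (0 : Int) = some t0 := by
    simp [PySem.List.pyGet?, PySem.List.pyIdx?]
  simp only [hg]
  rw [pv_row_eq]
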